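-- pv_equiv track=rewrite | github.com/jonas-kell/bachelor-thesis-code | structures/neighbors.py | triangular_hexagonal_nr_lattice_sites
-- ===== SOURCE A (Python) =====
-- def triangular_hexagonal_nr_lattice_sites(n):
--     assert n > 1
--
--     number = 0
--
--     for r in range(-n + 1, n):
--         for q in range(-n + 1, n):
--             s = 0 - q - r
--
--             if max(abs(q), abs(r), abs(s)) < n:
--                 number += 1
--
--     return number
-- ===== SOURCE B (Python) =====
-- def triangular_hexagonal_nr_lattice_sites(n):
--     assert n > 1
--     # closed-form centered hexagonal number
--     return 3 * n * n - 3 * n + 1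
-- ===== Notes on version B (the rewrite author's own statement) =====
-- stated objective: faster
-- what changed: Replaces the O(n^2) double loop over axial coordinates counting cells of the hexagon of radius n by the closed-form centered hexagonal number 3n^2-3n+1.
import Mathlib
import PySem

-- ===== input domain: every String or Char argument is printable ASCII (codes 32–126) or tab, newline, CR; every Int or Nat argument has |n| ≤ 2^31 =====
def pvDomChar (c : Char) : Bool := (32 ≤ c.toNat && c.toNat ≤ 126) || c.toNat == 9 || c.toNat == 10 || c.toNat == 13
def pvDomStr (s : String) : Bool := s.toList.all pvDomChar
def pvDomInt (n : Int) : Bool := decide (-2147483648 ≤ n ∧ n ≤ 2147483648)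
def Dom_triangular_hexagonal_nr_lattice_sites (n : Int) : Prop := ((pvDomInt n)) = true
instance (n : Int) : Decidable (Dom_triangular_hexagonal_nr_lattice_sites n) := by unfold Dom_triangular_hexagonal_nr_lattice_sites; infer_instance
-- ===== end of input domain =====

-- B replaces A's O(n^2) double loop by the closed-form centered hexagonal number 3n^2-3n+1 (O(1)).

-- ===== PORT A =====
-- the 'assert n > 1' is Pre_'s to exclude; the loops themselves are ported literally
def triangular_hexagonal_nr_lattice_sites (n : Int) : Int :=
  (PySem.List.pyRange (-n + 1) n 1).foldl (fun number r =>
    (PySem.List.pyRange (-n + 1) n 1).foldl (fun number q =>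
      let s := 0 - q - r
      if max (max |q| |r|) |s| < n then number + 1 else number) number) 0

-- ===== PORT B =====
def triangular_hexagonal_nr_lattice_sites_alt (n : Int) : Int :=
  3 * n * n - 3 * n + 1

-- ===== PRECONDITION & SPEC =====
-- Python A (like B) asserts n > 1 and raises AssertionError for n ≤ 1; Pre_ excludes exactly those inputs.
def Pre_triangular_hexagonal_nr_lattice_sites (n : Int) : Prop := 2 ≤ n
instance (n : Int) : Decidable (Pre_triangular_hexagonal_nr_lattice_sites n) := by unfold Pre_triangular_hexagonal_nr_lattice_sites; infer_instance
def pvWitness_triangular_hexagonal_nr_lattice_sites : Int := 3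

def Spec_triangular_hexagonal_nr_lattice_sites (n : Int) (out : Int) : Prop := out = triangular_hexagonal_nr_lattice_sites_alt n
instance (n : Int) (out : Int) : Decidable (Spec_triangular_hexagonal_nr_lattice_sites n out) := by unfold Spec_triangular_hexagonal_nr_lattice_sites; infer_instance

-- ===== CLAIM (what is proved, stated in full; the proofs are below) =====
def Claim_equal_triangular_hexagonal_nr_lattice_sites : Prop := ∀ (n : Int), Dom_triangular_hexagonal_nr_lattice_sites n → Pre_triangular_hexagonal_nr_lattice_sites n → Spec_triangular_hexagonal_nr_lattice_sites n (triangular_hexagonal_nr_lattice_sites n)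

-- ===== LEMMAS AND PROOFS =====

-- number of elements of range(a, b) lying in the half-open interval [lo, hi)
theorem countP_pyRange_interval (lo hi b : Int) :
    ∀ (k : Nat) (a : Int), b - a ≤ (k : Int) →
      (PySem.List.pyRange a b 1).countP (fun q => decide (lo ≤ q ∧ q < hi))
        = (min b hi - max a lo).toNat := by
  intro k
  induction k with
  | zero =>
      intro a ha
      rw [PySem.List.pyRange_one_eq_nil (by omega)]
      simp only [List.countP_nil]
      omega
  | succ k ih =>
      intro a ha
      by_cases hab : b ≤ a
      · rw [PySem.List.pyRange_one_eq_nil hab]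
        simp only [List.countP_nil]
        omega
      · rw [not_le] at hab
        rw [PySem.List.pyRange_one_cons hab, List.countP_cons, ih (a + 1) (by omega)]
        by_cases hq : lo ≤ a ∧ a < hi
        · rw [if_pos (by simpa using hq)]
          omega
        · rw [if_neg (by simpa using hq)]
          omega

-- sum of (C - |r|) over the symmetric range -m .. m
theorem sum_C_sub_abs (C : Int) :
    ∀ (m : Nat),
      ((PySem.List.pyRange (-(m : Int)) ((m : Int) + 1) 1).map (fun r => C - |r|)).sum
        = (2 * (m : Int) + 1) * C - (m : Int) * ((m : Int) + 1) := by
  intro m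
  induction m with
  | zero =>
      rw [PySem.List.pyRange_one_cons (by norm_num), PySem.List.pyRange_one_eq_nil (by norm_num)]
      simp
  | succ m ih =>
      have h1 : PySem.List.pyRange (-((m + 1 : Nat) : Int)) (((m + 1 : Nat) : Int) + 1) 1
          = (-((m : Int) + 1)) :: PySem.List.pyRange (-(m : Int)) ((m : Int) + 2) 1 := by
        push_cast
        rw [PySem.List.pyRange_one_cons (by omega)]
        ring_nf
      have h2 : PySem.List.pyRange (-(m : Int)) ((m : Int) + 2) 1
          = PySem.List.pyRange (-(m : Int)) ((m : Int) + 1) 1 ++ [(m : Int) + 1] := by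
        have := PySem.List.pyRange_one_succ_right (a := -(m : Int)) (b := (m : Int) + 1) (by omega)
        rw [show (m : Int) + 2 = (m : Int) + 1 + 1 by ring, this]
      rw [h1, List.map_cons, List.sum_cons, h2, List.map_append, List.sum_append, ih]
      have ha : |(-((m : Int) + 1))| = (m : Int) + 1 := by
        rw [abs_of_nonpos (by omega)]; ring
      have hb : |((m : Int) + 1)| = (m : Int) + 1 := abs_of_nonneg (by omega)
      rw [ha]
      rw [show List.map (fun r : Int => C - |r|) [(m : Int) + 1] = [C - ((m : Int) + 1)] by
        simp [hb]]
      simp only [List.sum_cons, List.sum_nil]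
      push_cast
      ring

theorem closed_form (n : Int) (hn : 2 ≤ n) :
    triangular_hexagonal_nr_lattice_sites n = 3 * n * n - 3 * n + 1 := by
  obtain ⟨m, hm⟩ : ∃ m : Nat, (m : Int) = n - 1 := ⟨(n - 1).toNat, by omega⟩
  -- inner loop: for r in range, the fold adds exactly (2n - 1 - |r|)
  have hinner : ∀ (acc r : Int), r ∈ PySem.List.pyRange (-n + 1) n 1 →
      (PySem.List.pyRange (-n + 1) n 1).foldl (fun number q =>
        let s := 0 - q - r
        if max (max |q| |r|) |s| < n then number + 1 else number) acc
      = acc + (2 * n - 1 - |r|) := by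
    intro acc r hr
    rw [PySem.List.mem_pyRange_one] at hr
    rw [PySem.List.foldl_ite_add_one]
    have hc : (PySem.List.pyRange (-n + 1) n 1).countP
        (fun q => decide (max (max |q| |r|) |0 - q - r| < n))
        = (PySem.List.pyRange (-n + 1) n 1).countP
        (fun q => decide (1 - n - r ≤ q ∧ q < n - r)) := by
      apply List.countP_congr
      intro q hq
      rw [PySem.List.mem_pyRange_one] at hq
      simp only [decide_eq_true_eq, Int.abs_eq_natAbs]
      omega
    rw [hc, countP_pyRange_interval (1 - n - r) (n - r) n (2 * n).toNat (-n + 1) (by omega)]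
    simp only [Int.abs_eq_natAbs]
    omega
  have step1 : triangular_hexagonal_nr_lattice_sites n
      = (PySem.List.pyRange (-n + 1) n 1).foldl (fun acc r => acc + (2 * n - 1 - |r|)) 0 :=
    PySem.List.foldl_congr_mem _ _ _ 0 hinner
  rw [step1, PySem.List.foldl_add]
  have hrange : PySem.List.pyRange (-n + 1) n 1
      = PySem.List.pyRange (-(m : Int)) ((m : Int) + 1) 1 := by
    rw [show (-n + 1 : Int) = -(m : Int) by omega, show (n : Int) = (m : Int) + 1 by omega]
  rw [hrange,
      show (fun r : Int => 2 * n - 1 - |r|) = (fun r : Int => (2 * n - 1) - |r|) from rfl,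
      sum_C_sub_abs (2 * n - 1) m, hm]
  ring

-- ===== VERDICT (by name: the statement is the Claim_ definition above) =====
theorem triangular_hexagonal_nr_lattice_sites_spec : Claim_equal_triangular_hexagonal_nr_lattice_sites := by
  intro n _ hpre
  unfold Spec_triangular_hexagonal_nr_lattice_sites triangular_hexagonal_nr_lattice_sites_alt
  exact closed_form n hpre
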